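-- pv_equiv track=rewrite | github.com/amellola/PFE | deepatlas/lib/dataloaders/deepatlas.py | _subdivide_list_of_data_pairs
-- ===== SOURCE A (Python) =====
-- def _subdivide_list_of_data_pairs(data_pairs_list):
--     """Sort the data pairs according to the number of segmentations available."""
--     out_dict = {"00": [], "01": [], "10": [], "11": []}
--     for d in data_pairs_list:
--         if "seg1" in d.keys() and "seg2" in d.keys():
--             out_dict["11"].append(d)
--         elif "seg1" in d.keys():
--             out_dict["10"].append(d)
--         elif "seg2" in d.keys():
--             out_dict["01"].append(d)
--         else:
--             out_dict["00"].append(d)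
--     return out_dict
-- ===== SOURCE B (Python) =====
-- def _subdivide_list_of_data_pairs(data_pairs_list):
--     """Sort the data pairs according to the number of segmentations available."""
--     return {
--         "00": [d for d in data_pairs_list if "seg1" not in d and "seg2" not in d],
--         "01": [d for d in data_pairs_list if "seg2" in d and "seg1" not in d],
--         "10": [d for d in data_pairs_list if "seg1" in d and "seg2" not in d],
--         "11": [d for d in data_pairs_list if "seg1" in d and "seg2" in d],
--     }
-- ===== Notes on version B (the rewrite author's own statement) =====
-- stated objective: simpler
-- what changed: Replaces the single categorizing loop with a stateful dict of buckets by a dict literal of four independent list comprehensions, each filtering the input once with the bucket's own predicate.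
import Mathlib
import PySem

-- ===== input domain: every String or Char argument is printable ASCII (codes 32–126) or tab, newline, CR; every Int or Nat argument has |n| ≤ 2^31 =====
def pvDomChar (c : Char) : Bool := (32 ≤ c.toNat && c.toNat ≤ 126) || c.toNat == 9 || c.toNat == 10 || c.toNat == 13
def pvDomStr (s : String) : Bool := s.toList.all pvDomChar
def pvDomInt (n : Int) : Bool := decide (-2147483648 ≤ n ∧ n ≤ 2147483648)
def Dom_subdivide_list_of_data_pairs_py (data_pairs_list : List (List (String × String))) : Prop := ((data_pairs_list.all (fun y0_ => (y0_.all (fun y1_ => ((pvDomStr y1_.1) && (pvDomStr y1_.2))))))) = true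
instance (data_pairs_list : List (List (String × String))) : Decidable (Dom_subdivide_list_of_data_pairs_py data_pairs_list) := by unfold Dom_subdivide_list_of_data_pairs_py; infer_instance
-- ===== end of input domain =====

-- B replaces A's single categorizing loop over a mutable dict of buckets by a dict literal of
-- four independent filtering passes (objective: simpler).

-- "k in d.keys()" for an inner dict d (association list)
def pvHasKey (d : List (String × String)) (k : String) : Bool := (PySem.Dict.mk d).contains k

-- ===== PORT A =====
-- the body of A's for-loop (one categorizing step on the mutable out_dict)
def pvStepA (out_dict : PySem.Dict String (List (List (String × String))))
    (d : List (String × String)) : PySem.Dict String (List (List (String × String))) :=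
  if pvHasKey d "seg1" && pvHasKey d "seg2" then out_dict.modify "11" [] (· ++ [d])
  else if pvHasKey d "seg1" then out_dict.modify "10" [] (· ++ [d])
  else if pvHasKey d "seg2" then out_dict.modify "01" [] (· ++ [d])
  else out_dict.modify "00" [] (· ++ [d])

def subdivide_list_of_data_pairs_py (data_pairs_list : List (List (String × String))) : List (String × List (List (String × String))) :=
  (data_pairs_list.foldl pvStepA
    (PySem.Dict.mk [("00", []), ("01", []), ("10", []), ("11", [])])).items

-- ===== PORT B =====
def subdivide_list_of_data_pairs_py_alt (data_pairs_list : List (List (String × String))) : List (String × List (List (String × String))) :=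
  [ ("00", data_pairs_list.filter (fun d => !pvHasKey d "seg1" && !pvHasKey d "seg2")),
    ("01", data_pairs_list.filter (fun d => pvHasKey d "seg2" && !pvHasKey d "seg1")),
    ("10", data_pairs_list.filter (fun d => pvHasKey d "seg1" && !pvHasKey d "seg2")),
    ("11", data_pairs_list.filter (fun d => pvHasKey d "seg1" && pvHasKey d "seg2")) ]

-- ===== PRECONDITION & SPEC =====
def Spec_subdivide_list_of_data_pairs_py (data_pairs_list : List (List (String × String))) (out : List (String × List (List (String × String)))) : Prop := out = subdivide_list_of_data_pairs_py_alt data_pairs_list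
instance (data_pairs_list : List (List (String × String))) (out : List (String × List (List (String × String)))) : Decidable (Spec_subdivide_list_of_data_pairs_py data_pairs_list out) := by unfold Spec_subdivide_list_of_data_pairs_py; infer_instance

-- ===== CLAIM (what is proved, stated in full; the proofs are below) =====
def Claim_equal_subdivide_list_of_data_pairs_py : Prop := ∀ (data_pairs_list : List (List (String × String))), Dom_subdivide_list_of_data_pairs_py data_pairs_list → Spec_subdivide_list_of_data_pairs_py data_pairs_list (subdivide_list_of_data_pairs_py data_pairs_list)

-- ===== LEMMAS AND PROOFS =====

-- one loop step on a literal 4-bucket dict appends d to the bucket its condition selects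
theorem pvStepA_mk (d : List (String × String)) (a b c e : List (List (String × String))) :
    pvStepA (PySem.Dict.mk [("00", a), ("01", b), ("10", c), ("11", e)]) d =
    PySem.Dict.mk
      [ ("00", if !pvHasKey d "seg1" && !pvHasKey d "seg2" then a ++ [d] else a),
        ("01", if pvHasKey d "seg2" && !pvHasKey d "seg1" then b ++ [d] else b),
        ("10", if pvHasKey d "seg1" && !pvHasKey d "seg2" then c ++ [d] else c),
        ("11", if pvHasKey d "seg1" && pvHasKey d "seg2" then e ++ [d] else e) ] := by
  by_cases h1 : pvHasKey d "seg1" = true <;> by_cases h2 : pvHasKey d "seg2" = true <;>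
    simp [pvStepA, h1, h2, PySem.Dict.modify, PySem.Dict.getD, PySem.Dict.get?,
          PySem.Dict.insert, PySem.Dict.contains]

-- loop invariant: folding from a literal 4-bucket dict appends each bucket's filtered elements
theorem pv_fold_inv (l : List (List (String × String)))
    (a b c e : List (List (String × String))) :
    (l.foldl pvStepA (PySem.Dict.mk [("00", a), ("01", b), ("10", c), ("11", e)])) =
    PySem.Dict.mk
      [ ("00", a ++ l.filter (fun d => !pvHasKey d "seg1" && !pvHasKey d "seg2")),
        ("01", b ++ l.filter (fun d => pvHasKey d "seg2" && !pvHasKey d "seg1")),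
        ("10", c ++ l.filter (fun d => pvHasKey d "seg1" && !pvHasKey d "seg2")),
        ("11", e ++ l.filter (fun d => pvHasKey d "seg1" && pvHasKey d "seg2")) ] := by
  induction l generalizing a b c e with
  | nil => simp [List.filter]
  | cons d t ih =>
    rw [List.foldl_cons, pvStepA_mk, ih]
    by_cases h1 : pvHasKey d "seg1" = true <;> by_cases h2 : pvHasKey d "seg2" = true <;>
      simp [h1, h2]

-- ===== VERDICT (by name: the statement is the Claim_ definition above) =====
theorem subdivide_list_of_data_pairs_py_spec : Claim_equal_subdivide_list_of_data_pairs_py := by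
  intro l _
  unfold Spec_subdivide_list_of_data_pairs_py subdivide_list_of_data_pairs_py
    subdivide_list_of_data_pairs_py_alt
  rw [pv_fold_inv]
  simp
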